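-- pv_equiv track=rewrite | github.com/Osmannori123/OFI-feature-construction | ofi-features.py | coefficientsToString
-- ===== SOURCE A (Python) =====
-- def coefficientsToString(coeffs):
--     if len(coeffs) == 1:
--         return str(coeffs[0])
--     else:
--         terms = [ ]
--         for i in range(len(coeffs)):
--             coeff = coeffs[i]
--             if (coeff != 0):
--                 isNegative = (coeff < 0)
--                 coeff = abs(coeff)
--                 if (terms != [ ]):
--                     terms.append(' - ' if isNegative else ' + ')
--                 if (terms == [ ]) and isNegative:
--                     terms.append('-')
--                 if ((coeff != 1) or (i == len(coeffs)-1)):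
--                     terms.append(str(coeff))
--                 power = len(coeffs)-1-i
--                 if (power == 1): terms.append('x')
--                 elif (power > 1): terms.append(f'x**{power}')
--         return ''.join(terms)
-- ===== SOURCE B (Python) =====
-- def coefficientsToString(coeffs):
--     if len(coeffs) == 1:
--         return str(coeffs[0])
--     parts = []
--     for power, c in enumerate(reversed(coeffs)):
--         if c == 0:
--             continue
--         body = ('' if abs(c) == 1 and power != 0 else str(abs(c))) + \
--                ('' if power == 0 else 'x' if power == 1 else f'x**{power}')
--         parts.append((' - ' if c < 0 else ' + ') + body)
--     s = ''.join(reversed(parts))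
--     if s.startswith(' + '):
--         return s[3:]
--     if s.startswith(' - '):
--         return '-' + s[3:]
--     return s
-- ===== Notes on version B (the rewrite author's own statement) =====
-- stated objective: alternative
-- what changed: A walks the coefficients forward with a stateful terms buffer whose sign emission depends on whether a term was already emitted; B iterates over enumerate(reversed(coeffs)) by ascending power collecting one uniformly signed fragment ' + body'/' - body' per nonzero coefficient, joins the collected fragments in reverse, and then repairs the leading separator by string surgery (strip a leading ' + ', turn a leading ' - ' into '-').
import Mathlib
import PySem

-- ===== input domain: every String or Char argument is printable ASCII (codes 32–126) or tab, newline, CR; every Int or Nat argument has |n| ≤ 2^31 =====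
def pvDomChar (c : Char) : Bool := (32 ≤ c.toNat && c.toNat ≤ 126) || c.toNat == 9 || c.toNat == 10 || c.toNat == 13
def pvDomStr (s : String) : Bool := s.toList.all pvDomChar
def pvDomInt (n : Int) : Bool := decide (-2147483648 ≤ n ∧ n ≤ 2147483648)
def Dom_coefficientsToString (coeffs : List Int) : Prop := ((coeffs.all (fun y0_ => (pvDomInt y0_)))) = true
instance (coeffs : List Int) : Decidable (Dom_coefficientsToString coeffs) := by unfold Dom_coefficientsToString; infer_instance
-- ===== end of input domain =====

-- B replaces A's stateful forward loop (which special-cases the first emitted term) by a reverse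
-- traversal by ascending power that PREPENDS uniformly signed terms ' + body'/' - body', and then
-- fixes the leading separator by string surgery (strip ' + ' / turn ' - ' into '-'). Objective: alternative.

-- ===== PORT A =====
-- one iteration of A's for-loop: appends separator/sign, numeric part and variable part to `terms`
def pvStepA (n : Int) (terms : List String) (ic : Int × Int) : List String :=
  let i := ic.1
  let coeff := ic.2
  if coeff ≠ 0 then
    let isNegative := coeff < 0
    let coeff := |coeff|
    let terms := if terms ≠ [] then terms ++ [if isNegative then " - " else " + "] else terms
    let terms := if terms = [] ∧ isNegative then terms ++ ["-"] else terms
    let terms := if coeff ≠ 1 ∨ i = n - 1 then terms ++ [PySem.Int.toStr coeff] else terms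
    let power := n - 1 - i
    if power = 1 then terms ++ ["x"]
    else if power > 1 then terms ++ ["x**" ++ PySem.Int.toStr power]
    else terms
  else terms

def coefficientsToString (coeffs : List Int) : String :=
  if coeffs.length = 1 then PySem.Int.toStr ((PySem.List.pyGet? coeffs 0).getD 0)
  else
    let terms := (PySem.List.enumerate coeffs).foldl (pvStepA coeffs.length) []
    PySem.Str.join "" terms

-- ===== PORT B =====
-- one iteration of B's loop over enumerate(reversed(coeffs)): append the uniformly signed
-- fragment ' ± body' to `parts` for a nonzero coeff (`continue` for a zero one)
def pvStepB (ps : List String) (pc : Int × Int) : List String :=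
  if pc.2 = 0 then ps
  else
    let power := pc.1
    let body := (if |pc.2| = 1 ∧ power ≠ 0 then "" else PySem.Int.toStr |pc.2|) ++
                (if power = 0 then "" else if power = 1 then "x" else "x**" ++ PySem.Int.toStr power)
    ps ++ [(if pc.2 < 0 then " - " else " + ") ++ body]

def coefficientsToString_alt (coeffs : List Int) : String :=
  if coeffs.length = 1 then PySem.Int.toStr ((PySem.List.pyGet? coeffs 0).getD 0)
  else
    let parts := (PySem.List.enumerate coeffs.reverse).foldl pvStepB []
    let s := PySem.Str.join "" parts.reverse
    if PySem.Str.startswith s " + " then PySem.Str.slice s (some 3) none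
    else if PySem.Str.startswith s " - " then "-" ++ PySem.Str.slice s (some 3) none
    else s

-- ===== PRECONDITION & SPEC =====
def Spec_coefficientsToString (coeffs : List Int) (out : String) : Prop := out = coefficientsToString_alt coeffs
instance (coeffs : List Int) (out : String) : Decidable (Spec_coefficientsToString coeffs out) := by unfold Spec_coefficientsToString; infer_instance

-- ===== CLAIM (what is proved, stated in full; the proofs are below) =====
def Claim_equal_coefficientsToString : Prop := ∀ (coeffs : List Int), Dom_coefficientsToString coeffs → Spec_coefficientsToString coeffs (coefficientsToString coeffs)

-- ===== LEMMAS AND PROOFS =====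

-- the body string both versions build for a nonzero coefficient c of power n-1-i
def pvBody (n i c : Int) : String :=
  (if |c| = 1 ∧ n - 1 - i ≠ 0 then "" else PySem.Int.toStr |c|) ++
  (if n - 1 - i = 0 then "" else if n - 1 - i = 1 then "x" else "x**" ++ PySem.Int.toStr (n - 1 - i))

-- the uniformly signed term for a (power, coeff) pair ('' for a zero coeff)
def pvTerm (pc : Int × Int) : String :=
  if pc.2 = 0 then ""
  else (if pc.2 < 0 then " - " else " + ") ++
    ((if |pc.2| = 1 ∧ pc.1 ≠ 0 then "" else PySem.Int.toStr |pc.2|) ++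
     (if pc.1 = 0 then "" else if pc.1 = 1 then "x" else "x**" ++ PySem.Int.toStr pc.1))

-- proof-side entry collector: (sign, body) per nonzero coefficient, forward order
def pvStepE (n : Int) (es : List (Bool × String)) (ic : Int × Int) : List (Bool × String) :=
  if ic.2 = 0 then es
  else es ++ [(decide (ic.2 < 0), pvBody n ic.1 ic.2)]

-- rendering of the entry list as the tail of the output (every entry with its ' + '/' - ' separator)
def pvTailR (es : List (Bool × String)) : String :=
  PySem.Str.join "" (es.map (fun e => (if e.1 then " - " else " + ") ++ e.2))

-- rendering of the entry list as the whole output (first entry with bare '-' sign)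
def pvHeadR (es : List (Bool × String)) : String :=
  match es with
  | [] => ""
  | (neg, body) :: rest => (if neg then "-" else "") ++ body ++ pvTailR rest

theorem join_nil' : PySem.Str.join "" ([] : List String) = "" := by
  simp [PySem.Str.join, PySem.Chars.join, List.intercalate]

theorem join_cons' (a : String) (l : List String) :
    PySem.Str.join "" (a :: l) = a ++ PySem.Str.join "" l := by
  simp [PySem.Str.join, PySem.Chars.join, List.intercalate]
  cases l with
  | nil => simp
  | cons b t => simp

theorem join_append' (l1 l2 : List String) :
    PySem.Str.join "" (l1 ++ l2) = PySem.Str.join "" l1 ++ PySem.Str.join "" l2 := by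
  induction l1 with
  | nil => simp [join_nil']
  | cons a t ih => simp [join_cons', ih, String.append_assoc]

theorem foldE_append (n : Int) (l : List (Int × Int)) (es : List (Bool × String)) :
    l.foldl (pvStepE n) es = es ++ l.foldl (pvStepE n) [] := by
  induction l generalizing es with
  | nil => simp
  | cons p t ih =>
    rw [List.foldl_cons, List.foldl_cons]
    by_cases hc : p.2 = 0
    · simp only [pvStepE, hc, if_pos rfl]
      exact ih es
    · simp only [pvStepE, hc, if_neg hc, if_false]
      rw [ih (es ++ [(decide (p.2 < 0), pvBody n p.1 p.2)]),
        ih ([] ++ [(decide (p.2 < 0), pvBody n p.1 p.2)])]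
      simp

theorem stepA_nonempty (n i c : Int) (terms : List String) (hc : c ≠ 0)
    (hi : 0 ≤ i ∧ i < n) (ht : terms ≠ []) :
    PySem.Str.join "" (pvStepA n terms (i, c)) =
      PySem.Str.join "" terms ++ ((if decide (c < 0) then " - " else " + ") ++ pvBody n i c) := by
  by_cases hp0 : n - 1 - i = 0
  · have e1 : ¬ (n - 1 - i = 1) := by omega
    have e2 : ¬ (n - 1 - i > 1) := by omega
    have e3 : i = n - 1 := by omega
    simp [pvStepA, pvBody, hc, ht, e1, e2, e3, hp0, join_append', join_cons', join_nil',
      String.append_assoc]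
  · have e4 : (i = n - 1) = False := by simp; omega
    by_cases hp1 : n - 1 - i = 1
    · by_cases h1 : |c| = 1 <;>
        simp [pvStepA, pvBody, hc, ht, hp0, hp1, h1, e4,
          join_append', join_cons', join_nil', String.append_assoc]
    · have e2 : n - 1 - i > 1 := by omega
      by_cases h1 : |c| = 1 <;>
        simp [pvStepA, pvBody, hc, ht, hp0, hp1, e2, h1, e4,
          join_append', join_cons', join_nil', String.append_assoc]

theorem stepA_ne (n i c : Int) (terms : List String) (hc : c ≠ 0) (hi : 0 ≤ i ∧ i < n) :
    pvStepA n terms (i, c) ≠ [] := by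
  have h1 : |c| = 1 ∨ ¬ |c| = 1 := em _
  simp only [pvStepA, hc]
  split_ifs <;> simp_all <;> omega

theorem stepA_empty (n i c : Int) (hc : c ≠ 0) (hi : 0 ≤ i ∧ i < n) :
    PySem.Str.join "" (pvStepA n [] (i, c)) =
      (if decide (c < 0) then "-" else "") ++ pvBody n i c := by
  by_cases hp0 : n - 1 - i = 0
  · have e1 : ¬ (n - 1 - i = 1) := by omega
    have e2 : ¬ (n - 1 - i > 1) := by omega
    have e3 : i = n - 1 := by omega
    by_cases hneg : c < 0 <;>
      simp [pvStepA, pvBody, hc, e1, e2, e3, hp0, hneg,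
        join_append', join_cons', join_nil', String.append_assoc]
  · have e4 : (i = n - 1) = False := by simp; omega
    by_cases hp1 : n - 1 - i = 1 <;> [skip; have e2 : n - 1 - i > 1 := by omega] <;>
      by_cases h1 : |c| = 1 <;> by_cases hneg : c < 0 <;>
        simp_all [pvStepA, pvBody, join_append', join_cons', join_nil', String.append_assoc]
    all_goals split_ifs <;> simp_all [join_cons', join_nil']

-- A's loop starting from a nonempty `terms` produces the tail rendering of the entries
theorem loop_nonempty (n : Int) (l : List (Int × Int)) :
    ∀ terms : List String, (∀ p ∈ l, 0 ≤ p.1 ∧ p.1 < n) → terms ≠ [] →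
    PySem.Str.join "" (l.foldl (pvStepA n) terms) =
      PySem.Str.join "" terms ++ pvTailR (l.foldl (pvStepE n) []) := by
  induction l with
  | nil => intro terms _ _; simp [pvTailR, join_nil']
  | cons p t ih =>
    intro terms hmem ht
    obtain ⟨i, c⟩ := p
    have hi := hmem (i, c) (List.mem_cons_self ..)
    have hmem' : ∀ q ∈ t, 0 ≤ q.1 ∧ q.1 < n := fun q hq => hmem q (List.mem_cons_of_mem _ hq)
    by_cases hc : c = 0
    · simp only [List.foldl_cons, pvStepA, pvStepE, hc]
      simpa using ih terms hmem' ht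
    · rw [List.foldl_cons, List.foldl_cons,
        ih (pvStepA n terms (i, c)) hmem' (stepA_ne n i c terms hc hi),
        stepA_nonempty n i c terms hc hi ht]
      simp only [pvStepE, hc, if_neg hc, if_false]
      rw [foldE_append n t ([] ++ [(decide (c < 0), pvBody n i c)])]
      simp [pvTailR, join_cons', String.append_assoc]

-- A's loop starting from empty `terms` produces the head rendering of the entries
theorem loop_empty (n : Int) (l : List (Int × Int)) (h : ∀ p ∈ l, 0 ≤ p.1 ∧ p.1 < n) :
    PySem.Str.join "" (l.foldl (pvStepA n) []) = pvHeadR (l.foldl (pvStepE n) []) := by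
  cases l with
  | nil => simp [pvHeadR, join_nil']
  | cons p t =>
    obtain ⟨i, c⟩ := p
    have hi := h (i, c) (List.mem_cons_self ..)
    have hmem' : ∀ q ∈ t, 0 ≤ q.1 ∧ q.1 < n := fun q hq => h q (List.mem_cons_of_mem _ hq)
    by_cases hc : c = 0
    · simp only [List.foldl_cons, pvStepA, pvStepE, hc]
      exact loop_empty n t hmem'
    · rw [List.foldl_cons, List.foldl_cons,
        loop_nonempty n t (pvStepA n [] (i, c)) hmem' (stepA_ne n i c [] hc hi),
        stepA_empty n i c hc hi]
      simp only [pvStepE, hc, if_neg hc, if_false]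
      rw [foldE_append n t ([] ++ [(decide (c < 0), pvBody n i c)])]
      simp [pvHeadR, String.append_assoc]

theorem enumerate_bounds (coeffs : List Int) :
    ∀ p ∈ PySem.List.enumerate coeffs, 0 ≤ p.1 ∧ p.1 < (coeffs.length : Int) := by
  intro p hp
  rw [PySem.List.mem_enumerate_iff] at hp
  obtain ⟨k, hk, rfl⟩ := hp
  constructor <;> simp <;> omega

-- B's fold appends; factoring the seed out
theorem foldB_append (l : List (Int × Int)) (ps : List String) :
    l.foldl pvStepB ps = ps ++ l.foldl pvStepB [] := by
  induction l generalizing ps with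
  | nil => simp
  | cons p t ih =>
    rw [List.foldl_cons, List.foldl_cons]
    by_cases hc : p.2 = 0
    · have hz : ∀ qs : List String, pvStepB qs p = qs := by intro qs; simp [pvStepB, hc]
      rw [hz, hz]
      exact ih ps
    · have hz : ∀ qs : List String, pvStepB qs p = qs ++ [pvTerm p] := by
        intro qs; simp [pvStepB, pvTerm, hc]
      rw [hz, hz, ih (ps ++ [pvTerm p]), ih ([] ++ [pvTerm p])]
      simp

-- joining B's parts in reverse concatenates the terms of the reversed pair list
theorem foldB_eq (l : List (Int × Int)) :
    PySem.Str.join "" (l.foldl pvStepB []).reverse =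
      PySem.Str.join "" (l.reverse.map pvTerm) := by
  induction l with
  | nil => simp
  | cons p t ih =>
    rw [List.foldl_cons, List.reverse_cons, List.map_append, List.map_cons, List.map_nil,
      join_append', join_cons', join_nil']
    by_cases hc : p.2 = 0
    · have hz : pvStepB [] p = [] := by simp [pvStepB, hc]
      rw [hz, ih]
      simp [pvTerm, hc]
    · have hz : pvStepB [] p = [pvTerm p] := by simp [pvStepB, pvTerm, hc]
      rw [hz, foldB_append t [pvTerm p], List.reverse_append, join_append', ih]
      simp [join_cons', join_nil']

-- reversing the enumeration of the reversed list flips the index i ↦ n-1-i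
theorem enumerate_reverse (xs : List Int) :
    (PySem.List.enumerate xs.reverse).reverse =
      (PySem.List.enumerate xs).map (fun pc => ((xs.length : Int) - 1 - pc.1, pc.2)) := by
  apply List.ext_getElem
  · simp [PySem.List.length_enumerate]
  · intro k h1 h2
    have hk : k < xs.length := by
      simpa [PySem.List.length_enumerate] using h1
    rw [List.getElem_reverse, List.getElem_map]
    rw [PySem.List.getElem_enumerate, PySem.List.getElem_enumerate]
    have hlen : (PySem.List.enumerate xs.reverse).length = xs.length := by
      simp [PySem.List.length_enumerate]
    rw [List.getElem_reverse]
    simp only [Prod.mk.injEq]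
    refine ⟨?_, ?_⟩
    · simp [hlen]; push_cast; omega
    · congr 1
      simp [hlen]; omega

-- the tail rendering of the forward entries is the concatenation of the uniform terms
theorem tailR_eq (n : Int) (l : List (Int × Int)) :
    pvTailR (l.foldl (pvStepE n) []) =
      PySem.Str.join "" (l.map (fun pc => pvTerm (n - 1 - pc.1, pc.2))) := by
  induction l with
  | nil => simp [pvTailR, join_nil']
  | cons p t ih =>
    rw [List.foldl_cons, List.map_cons, join_cons']
    by_cases hc : p.2 = 0
    · have hz : pvStepE n [] p = [] := by simp [pvStepE, hc]
      rw [hz, ih]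
      simp [pvTerm, hc]
    · have hz : pvStepE n [] p = [(decide (p.2 < 0), pvBody n p.1 p.2)] := by
        simp [pvStepE, hc]
      rw [hz, foldE_append n t [(decide (p.2 < 0), pvBody n p.1 p.2)], List.singleton_append]
      have hthis : pvTailR ((decide (p.2 < 0), pvBody n p.1 p.2) :: t.foldl (pvStepE n) []) =
          ((if decide (p.2 < 0) then " - " else " + ") ++ pvBody n p.1 p.2) ++
            pvTailR (t.foldl (pvStepE n) []) := by
        simp [pvTailR, join_cons']
      rw [hthis, ih]
      by_cases hneg : p.2 < 0 <;> simp [pvTerm, pvBody, hc, hneg, String.append_assoc]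

-- string surgery on the uniform rendering recovers the head rendering
theorem startswith_plus (x : String) : PySem.Str.startswith (" + " ++ x) " + " = true := by
  simp [PySem.Chars.startswith_iff]

theorem startswith_minus (x : String) : PySem.Str.startswith (" - " ++ x) " - " = true := by
  simp [PySem.Chars.startswith_iff]

theorem startswith_minus_plus (cs : List Char) :
    PySem.Chars.startswith (' ' :: '-' :: ' ' :: cs) [' ', '+', ' '] = false := by
  rw [← Bool.not_eq_true, PySem.Chars.startswith_iff]
  simp [List.cons_prefix_cons]

theorem slice3_plus (x : String) : PySem.Str.slice (" + " ++ x) (some 3) none = x := by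
  apply String.toList_inj.mp
  rw [PySem.Str.toList_slice, String.toList_append, PySem.Chars.slice_eq_listSlice,
    show (3:Int) = ((3:Nat):Int) from rfl, PySem.List.slice_from_natCast]
  rfl

theorem slice3_minus (x : String) : PySem.Str.slice (" - " ++ x) (some 3) none = x := by
  apply String.toList_inj.mp
  rw [PySem.Str.toList_slice, String.toList_append, PySem.Chars.slice_eq_listSlice,
    show (3:Int) = ((3:Nat):Int) from rfl, PySem.List.slice_from_natCast]
  rfl

-- B's fixup applied to the tail rendering gives the head rendering
theorem fixup_eq (es : List (Bool × String)) :
    (if PySem.Str.startswith (pvTailR es) " + " then PySem.Str.slice (pvTailR es) (some 3) none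
     else if PySem.Str.startswith (pvTailR es) " - " then
       "-" ++ PySem.Str.slice (pvTailR es) (some 3) none
     else pvTailR es) = pvHeadR es := by
  cases es with
  | nil =>
    have h : pvTailR [] = "" := by simp [pvTailR, join_nil']
    rw [h]
    decide
  | cons e rest =>
    obtain ⟨neg, body⟩ := e
    cases neg with
    | false =>
      have h : pvTailR ((false, body) :: rest) = " + " ++ (body ++ pvTailR rest) := by
        simp [pvTailR, join_cons', String.append_assoc]
      rw [h, if_pos (startswith_plus _), slice3_plus]
      simp [pvHeadR]
    | true =>
      have h : pvTailR ((true, body) :: rest) = " - " ++ (body ++ pvTailR rest) := by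
        simp [pvTailR, join_cons', String.append_assoc]
      rw [h, if_neg (by simp [startswith_minus_plus]),
        if_pos (startswith_minus _), slice3_minus]
      simp [pvHeadR, String.append_assoc]

-- ===== VERDICT (by name: the statement is the Claim_ definition above) =====
theorem coefficientsToString_spec : Claim_equal_coefficientsToString := by
  intro coeffs _
  unfold Spec_coefficientsToString coefficientsToString coefficientsToString_alt
  by_cases h1 : coeffs.length = 1
  · simp [h1]
  · simp only [h1, if_false]
    rw [loop_empty (coeffs.length : Int) (PySem.List.enumerate coeffs) (enumerate_bounds coeffs)]
    have hfold : PySem.Str.join ""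
        ((PySem.List.enumerate coeffs.reverse).foldl pvStepB []).reverse =
        pvTailR ((PySem.List.enumerate coeffs).foldl (pvStepE (coeffs.length : Int)) []) := by
      rw [foldB_eq, enumerate_reverse, List.map_map,
        tailR_eq (coeffs.length : Int) (PySem.List.enumerate coeffs)]
      simp [Function.comp_def]
    rw [hfold]
    exact (fixup_eq _).symm
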